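-- pv_equiv track=rewrite | github.com/SocioProphet/TriTRPC | src/tritrpc_requirements_impl/codec.py | _parse_tleb3_trits
-- ===== SOURCE A (Python) =====
-- from typing import Sequence, Tuple
--
-- class TritPack243Error(ValueError):
--     """Raised when a TritPack243/TLEB3 canonicality rule is violated."""
--
-- def _parse_tleb3_trits(trits: Sequence[int]) -> int:
--     if len(trits) == 0 or len(trits) % 3 != 0:
--         raise TritPack243Error("TLEB3 requires a whole number of tritlets")
--     value = 0
--     saw_final = False
--     for idx in range(0, len(trits), 3):
--         continuation, p1, p0 = trits[idx : idx + 3]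
--         if continuation not in (0, 2):
--             raise TritPack243Error("TLEB3 continuation trit must be 0 or 2")
--         digit = p1 * 3 + p0
--         value += digit * (9 ** (idx // 3))
--         if continuation == 0:
--             if idx != len(trits) - 3:
--                 raise TritPack243Error("non-canonical TLEB3: final tritlet must be last")
--             saw_final = True
--     if not saw_final:
--         raise TritPack243Error("incomplete TLEB3: missing final tritlet")
--     return value
-- ===== SOURCE B (Python) =====
-- class TritPack243Error(ValueError):
--     """Raised when a TritPack243/TLEB3 canonicality rule is violated."""
--
-- def _parse_tleb3_trits(trits):
--     n = len(trits)
--     if n == 0 or n % 3 != 0: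
--         raise TritPack243Error("TLEB3 requires a whole number of tritlets")
--     # Pass 1: validation only, left to right, same errors in the same order as A.
--     saw_final = False
--     for idx in range(0, n, 3):
--         continuation = trits[idx]
--         if continuation not in (0, 2):
--             raise TritPack243Error("TLEB3 continuation trit must be 0 or 2")
--         if continuation == 0:
--             if idx != n - 3:
--                 raise TritPack243Error("non-canonical TLEB3: final tritlet must be last")
--             saw_final = True
--     if not saw_final:
--         raise TritPack243Error("incomplete TLEB3: missing final tritlet")
--     # Pass 2: Horner's method from the most significant tritlet; no 9**k powers.
--     value = 0
--     for idx in range(n - 3, -1, -3):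
--         value = value * 9 + trits[idx + 1] * 3 + trits[idx + 2]
--     return value
-- ===== Notes on version B (the rewrite author's own statement) =====
-- stated objective: alternative
-- what changed: Split A's single accumulate-while-validating loop into a forward validation pass and a separate Horner evaluation from the most significant tritlet (value = value*9 + digit), eliminating the 9**(idx//3) power computation.
import Mathlib
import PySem

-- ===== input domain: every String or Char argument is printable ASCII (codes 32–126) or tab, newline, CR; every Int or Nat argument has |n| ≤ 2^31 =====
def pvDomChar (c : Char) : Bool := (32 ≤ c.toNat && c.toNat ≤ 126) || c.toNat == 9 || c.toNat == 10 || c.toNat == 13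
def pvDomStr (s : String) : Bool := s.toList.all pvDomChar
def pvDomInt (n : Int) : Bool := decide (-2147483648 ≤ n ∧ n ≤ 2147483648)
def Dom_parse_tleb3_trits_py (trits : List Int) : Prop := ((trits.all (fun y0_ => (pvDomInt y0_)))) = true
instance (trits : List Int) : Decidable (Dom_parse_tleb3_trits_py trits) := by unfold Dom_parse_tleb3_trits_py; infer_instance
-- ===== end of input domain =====

-- B re-decomposes A into a validation pass plus Horner's method over the tritlets
-- (value = value*9 + digit from the most significant end), avoiding the 9**k powers;
-- equivalence of the return value is proved on the canonical inputs (Pre_), i.e.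
-- exactly those where A returns instead of raising TritPack243Error.

-- ===== PORT A =====
-- A's single loop: accumulate digit * 9^(idx//3) while checking canonicality.
-- Branches where the Python raises return 0; Pre_ excludes them.
def pvAuxA : List Int → Nat → Int → Int
  | c :: p1 :: p0 :: rest, k, acc =>
      if c = 0 then
        (if rest = [] then acc + (p1 * 3 + p0) * (9 : Int) ^ k
         else 0)                                -- raise: final tritlet must be last
      else if c = 2 then
        pvAuxA rest (k + 1) (acc + (p1 * 3 + p0) * (9 : Int) ^ k)
      else 0                                    -- raise: continuation must be 0 or 2
  | [], _, _ => 0                               -- raise: missing final tritlet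
  | _, _, _ => 0                                -- unreachable when length % 3 = 0

def parse_tleb3_trits_py (trits : List Int) : Int :=
  if trits.length = 0 ∨ trits.length % 3 ≠ 0 then 0    -- raise: whole number of tritlets
  else pvAuxA trits 0 0

-- ===== PORT B =====
-- Pass 1 of Source B: forward validation (true iff no TritPack243Error is raised there).
def pvValidB : List Int → Bool
  | [c, _, _] => c == 0
  | c :: _ :: _ :: rest => c == 2 && pvValidB rest
  | _ => false

-- Pass 2 of Source B: the (p1, p0) payload pairs of the tritlets, in order.
def pvGroupsB : List Int → List (Int × Int)
  | _ :: p1 :: p0 :: rest => (p1, p0) :: pvGroupsB rest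
  | _ => []

-- Horner loop of Source B: fold from the last (most significant) tritlet down.
def pvHornerB (trits : List Int) : Int :=
  (pvGroupsB trits).reverse.foldl (fun v p => v * 9 + p.1 * 3 + p.2) 0

def parse_tleb3_trits_py_alt (trits : List Int) : Int :=
  if trits.length = 0 ∨ trits.length % 3 ≠ 0 then 0    -- raise
  else if pvValidB trits then pvHornerB trits
  else 0                                               -- raise

-- ===== PRECONDITION & SPEC =====
-- Pre_: exactly the canonical TLEB3 sequences (where A returns): a nonempty whole
-- number of tritlets, continuation trit 2 on every tritlet except the last, 0 on the last.
def Pre_parse_tleb3_trits_py (trits : List Int) : Prop :=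
  trits ≠ [] ∧ trits.length % 3 = 0 ∧
  ∀ i ∈ List.range (trits.length / 3),
    trits.getD (3 * i) 0 = (if 3 * i + 3 = trits.length then 0 else 2)
instance (trits : List Int) : Decidable (Pre_parse_tleb3_trits_py trits) := by
  unfold Pre_parse_tleb3_trits_py; infer_instance

def pvWitness_parse_tleb3_trits_py : List Int := [2, 1, 0, 0, 0, 1]

def Spec_parse_tleb3_trits_py (trits : List Int) (out : Int) : Prop := out = parse_tleb3_trits_py_alt trits
instance (trits : List Int) (out : Int) : Decidable (Spec_parse_tleb3_trits_py trits out) := by unfold Spec_parse_tleb3_trits_py; infer_instance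

-- ===== CLAIM (what is proved, stated in full; the proofs are below) =====
def Claim_equal_parse_tleb3_trits_py : Prop := ∀ (trits : List Int), Dom_parse_tleb3_trits_py trits → Pre_parse_tleb3_trits_py trits → Spec_parse_tleb3_trits_py trits (parse_tleb3_trits_py trits)

-- ===== LEMMAS AND PROOFS =====

lemma pvPre_valid : ∀ (trits : List Int), Pre_parse_tleb3_trits_py trits → pvValidB trits = true := by
  intro trits
  induction trits using pvValidB.induct with
  | case1 c p1 p0 =>
      rintro ⟨-, -, h⟩
      have h0 := h 0 (by simp)
      simp at h0
      simp [pvValidB, h0]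
  | case2 c p1 p0 rest hne ih =>
      rintro ⟨-, hlen, h⟩
      have hrl : rest.length ≠ 0 := fun h0 => hne (List.eq_nil_of_length_eq_zero h0)
      have hr3 : rest.length % 3 = 0 := by
        simp [List.length_cons] at hlen; omega
      have hc : c = 2 := by
        have h0 := h 0 (by simp [List.length_cons])
        rw [if_neg (by simp [List.length_cons]; omega)] at h0
        simpa using h0
      have hrest : Pre_parse_tleb3_trits_py rest := by
        refine ⟨fun h0 => hne h0, hr3, ?_⟩
        intro i hi
        simp [List.mem_range] at hi
        have hmem := h (i + 1) (by simp [List.length_cons]; omega)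
        have e2 : (c :: p1 :: p0 :: rest).getD (3 * (i + 1)) 0 = rest.getD (3 * i) 0 := by
          simp [show 3 * (i + 1) = 3 * i + 1 + 1 + 1 from by ring]
        rw [e2, List.length_cons, List.length_cons, List.length_cons] at hmem
        rw [hmem]
        split_ifs <;> omega
      simp [pvValidB, hc, ih hrest]
  | case3 x hx1 hx2 =>
      rintro ⟨hne, hlen, -⟩
      exfalso
      match x with
      | [] => exact hne rfl
      | [a] => simp at hlen
      | [a, b] => simp at hlen
      | a :: b :: c :: l => exact hx2 a b c l rfl

lemma pvHornerB_cons (c p1 p0 : Int) (rest : List Int) :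
    pvHornerB (c :: p1 :: p0 :: rest) = pvHornerB rest * 9 + (p1 * 3 + p0) := by
  simp [pvHornerB, pvGroupsB, List.foldl_append]
  ring

lemma pvAuxA_horner : ∀ (trits : List Int), pvValidB trits = true →
    ∀ (k : Nat) (acc : Int), pvAuxA trits k acc = acc + pvHornerB trits * (9 : Int) ^ k := by
  intro trits
  induction trits using pvValidB.induct with
  | case1 c p1 p0 =>
      intro hv k acc
      simp [pvValidB] at hv
      simp [pvAuxA, hv, pvHornerB, pvGroupsB]
  | case2 c p1 p0 rest hne ih =>
      intro hv k acc
      simp [pvValidB] at hv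
      obtain ⟨hc, hrest⟩ := hv
      have hrne : rest ≠ [] := fun h0 => hne h0
      rw [pvAuxA]
      rw [if_neg (by simp [hc]), if_pos hc, ih hrest]
      rw [pvHornerB_cons]
      ring
  | case3 x hx1 hx2 =>
      intro hv
      exfalso
      match x with
      | [] => simp [pvValidB] at hv
      | [a] => simp [pvValidB] at hv
      | [a, b] => simp [pvValidB] at hv
      | a :: b :: c :: l => exact hx2 a b c l rfl

-- ===== VERDICT (by name: the statement is the Claim_ definition above) =====
theorem parse_tleb3_trits_py_spec : Claim_equal_parse_tleb3_trits_py := by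
  intro trits _ hpre
  obtain ⟨hne, hlen, -⟩ := id hpre
  have hv := pvPre_valid trits hpre
  have hlen0 : trits.length ≠ 0 := by simpa using hne
  unfold Spec_parse_tleb3_trits_py parse_tleb3_trits_py parse_tleb3_trits_py_alt
  rw [if_neg (by omega), if_neg (by omega), if_pos hv,
      pvAuxA_horner trits hv 0 0]
  simp
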